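-- pv_equiv track=rewrite | github.com/AdamBarnas/szamitogep | optymistyczne_wyznaczenie_odc.py | optymistyczne_wyznaczanie_odc
-- ===== SOURCE A (Python) =====
-- def column(matrix, i):
--     return [r[i] for r in matrix]
--
-- def find_zeros(macierz_zredukowana):
--     zeros_list = []
--     for i, row in enumerate(macierz_zredukowana):
--         for j, val in enumerate(row):
--             if macierz_zredukowana[i][j] == 0:
--                 zeros_list.append((i,j))
--     return zeros_list
--
-- def optymistyczne_wyznaczanie_odc(macierz_zredukowana):
--     #utworzenie listy zer i inicjalizacja zmiennych
--     zeros_list = find_zeros(macierz_zredukowana)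
--     zero_opt = (-1, -1)
--     max_cost = 0
--     for zero in zeros_list:
--         min_in_row = float("inf")
--         min_in_col = float("inf")
--         #szukanie minimum w wierszu
--         for i in macierz_zredukowana[zero[0]]:
--             if i < min_in_row and i != 0:
--                 min_in_row = i
--         col = column(macierz_zredukowana, zero[1])
--         #szukanie minumum w kolumnie
--         for j in col:
--              if j < min_in_col and j != 0:
--                 min_in_col = j
--         #szukany odcinek to max spośrów (min_in_col + min_in_row)
--         if max_cost < (min_in_row+min_in_col) and (min_in_row+min_in_col) != float('inf'):
--             max_cost = (min_in_row+min_in_col)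
--             zero_opt = zero
--
--     return zero_opt, max_cost
-- ===== SOURCE B (Python) =====
-- def _min_nonzero(xs):
--     best = None
--     for v in xs:
--         if v != 0 and (best is None or v < best):
--             best = v
--     return best
--
-- def optymistyczne_wyznaczanie_odc(macierz_zredukowana):
--     m = macierz_zredukowana
--     ncols = 0
--     for r in m:
--         if len(r) > ncols:
--             ncols = len(r)
--     row_min = [_min_nonzero(r) for r in m]
--     col_min = [_min_nonzero([r[j] for r in m if j < len(r)]) for j in range(ncols)]
--     zero_opt, max_cost = (-1, -1), 0
--     for i, row in enumerate(m):
--         rm = row_min[i]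
--         for j, v in enumerate(row):
--             if v == 0 and rm is not None and col_min[j] is not None:
--                 cost = rm + col_min[j]
--                 if cost > max_cost:
--                     zero_opt, max_cost = (i, j), cost
--     return zero_opt, max_cost
-- ===== Notes on version B (the rewrite author's own statement) =====
-- stated objective: alternative
-- what changed: B precomputes the minimal nonzero entry of every row and every column once and then scans the matrix cells in a single pass, instead of A's re-scanning of the whole row and whole column for each zero; on zero-sparse matrices this is not measurably faster in Python.
import Mathlib
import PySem

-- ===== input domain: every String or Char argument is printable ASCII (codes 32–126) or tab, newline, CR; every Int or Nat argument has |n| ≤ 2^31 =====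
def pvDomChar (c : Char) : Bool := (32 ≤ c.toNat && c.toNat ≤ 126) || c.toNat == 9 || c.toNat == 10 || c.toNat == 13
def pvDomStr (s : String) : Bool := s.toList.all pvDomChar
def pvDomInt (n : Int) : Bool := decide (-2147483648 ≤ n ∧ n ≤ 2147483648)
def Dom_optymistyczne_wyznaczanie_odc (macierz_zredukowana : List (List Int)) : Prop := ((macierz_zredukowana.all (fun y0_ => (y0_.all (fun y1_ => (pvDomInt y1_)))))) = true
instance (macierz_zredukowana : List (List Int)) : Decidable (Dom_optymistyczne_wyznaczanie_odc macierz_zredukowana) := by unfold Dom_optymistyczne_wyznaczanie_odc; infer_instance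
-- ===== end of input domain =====

-- B precomputes each row's and column's minimal nonzero entry once and scans the zeros in a
-- single pass (A re-scans the row and the column for every zero); exact same return value.

-- ===== PORT A =====

-- column(matrix, i) = [r[i] for r in matrix]; the IndexError case (pyGet? = none) is excluded by Pre_
def pvColumn (matrix : List (List Int)) (i : Int) : List Int :=
  matrix.map (fun r => (PySem.List.pyGet? r i).getD 0)

-- find_zeros: nested enumerate loop; macierz_zredukowana[i][j] is exactly the enumerated val here
def pvFindZeros (macierz_zredukowana : List (List Int)) : List (Int × Int) :=
  (PySem.List.enumerate macierz_zredukowana).foldl (fun acc p =>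
    (PySem.List.enumerate p.2).foldl (fun acc2 q =>
      if q.2 = 0 then acc2 ++ [(p.1, q.1)] else acc2) acc) []

-- the body of A's min-search loops: `if i < min_in_row and i != 0: min_in_row = i`,
-- with float("inf") represented as `none`
def pvStepA (acc : Option Int) (v : Int) : Option Int :=
  if (match acc with | none => true | some a => decide (v < a)) && decide (v ≠ 0)
  then some v else acc

-- the body of A's loop over zeros_list; the update condition
-- `max_cost < s and s != float('inf')` holds iff both minima are finite and st.2 < a + b
def pvZStepA (m : List (List Int)) (st : (Int × Int) × Int) (zero : Int × Int) :
    (Int × Int) × Int :=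
  let minInRow := ((PySem.List.pyGet? m zero.1).getD []).foldl pvStepA none
  let col := pvColumn m zero.2
  let minInCol := col.foldl pvStepA none
  match minInRow, minInCol with
  | some a, some b => if st.2 < a + b then (zero, a + b) else st
  | _, _ => st

def optymistyczne_wyznaczanie_odc (macierz_zredukowana : List (List Int)) : (Int × Int) × Int :=
  let zerosList := pvFindZeros macierz_zredukowana
  zerosList.foldl (pvZStepA macierz_zredukowana) ((-1, -1), 0)

-- ===== PORT B =====

-- _min_nonzero: `if v != 0 and (best is None or v < best): best = v`
def pvMinNonzero (xs : List Int) : Option Int :=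
  xs.foldl (fun best v =>
    if decide (v ≠ 0) && (match best with | none => true | some a => decide (v < a))
    then some v else best) none

-- [r[j] for r in m if j < len(r)]
def pvColEntries (m : List (List Int)) (j : Nat) : List Int :=
  m.filterMap (fun r => r[j]?)

def optymistyczne_wyznaczanie_odc_alt (macierz_zredukowana : List (List Int)) :
    (Int × Int) × Int :=
  let m := macierz_zredukowana
  let ncols := m.foldl (fun acc r => if acc < r.length then r.length else acc) 0
  let rowMin := m.map pvMinNonzero
  let colMin := (List.range ncols).map (fun j => pvMinNonzero (pvColEntries m j))
  (PySem.List.enumerate m).foldl (fun st p =>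
    let rm := (PySem.List.pyGet? rowMin p.1).getD none
    (PySem.List.enumerate p.2).foldl (fun st2 q =>
      if q.2 = 0 then
        match rm, (PySem.List.pyGet? colMin q.1).getD none with
        | some a, some b => if a + b > st2.2 then ((p.1, q.1), a + b) else st2
        | _, _ => st2
      else st2) st) ((-1, -1), 0)

-- ===== PRECONDITION & SPEC =====

-- Pre_ excludes exactly the ragged matrices on which A raises IndexError: a zero sitting in a
-- column j while some other row is too short to have a j-th entry (column() then indexes past it).
def Pre_optymistyczne_wyznaczanie_odc (macierz_zredukowana : List (List Int)) : Prop :=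
  ∀ r ∈ macierz_zredukowana, ∀ j < r.length, r[j]? = some 0 →
    ∀ r' ∈ macierz_zredukowana, j < r'.length
instance (macierz_zredukowana : List (List Int)) : Decidable (Pre_optymistyczne_wyznaczanie_odc macierz_zredukowana) := by unfold Pre_optymistyczne_wyznaczanie_odc; infer_instance

def pvWitness_optymistyczne_wyznaczanie_odc : List (List Int) := [[0, 2], [3, 0]]

def Spec_optymistyczne_wyznaczanie_odc (macierz_zredukowana : List (List Int)) (out : (Int × Int) × Int) : Prop := out = optymistyczne_wyznaczanie_odc_alt macierz_zredukowana
instance (macierz_zredukowana : List (List Int)) (out : (Int × Int) × Int) : Decidable (Spec_optymistyczne_wyznaczanie_odc macierz_zredukowana out) := by unfold Spec_optymistyczne_wyznaczanie_odc; infer_instance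

-- ===== CLAIM (what is proved, stated in full; the proofs are below) =====
def Claim_equal_optymistyczne_wyznaczanie_odc : Prop := ∀ (macierz_zredukowana : List (List Int)), Dom_optymistyczne_wyznaczanie_odc macierz_zredukowana → Pre_optymistyczne_wyznaczanie_odc macierz_zredukowana → Spec_optymistyczne_wyznaczanie_odc macierz_zredukowana (optymistyczne_wyznaczanie_odc macierz_zredukowana)

-- ===== LEMMAS AND PROOFS =====

def pvNcols (m : List (List Int)) : Nat :=
  m.foldl (fun acc r => if acc < r.length then r.length else acc) 0

-- B's per-zero step, with the row/column minima read from the precomputed tables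
def pvZStepB (m : List (List Int)) (st : (Int × Int) × Int) (z : Int × Int) :
    (Int × Int) × Int :=
  match (PySem.List.pyGet? (m.map pvMinNonzero) z.1).getD none,
        (PySem.List.pyGet? ((List.range (pvNcols m)).map
            (fun j => pvMinNonzero (pvColEntries m j))) z.2).getD none with
  | some a, some b => if a + b > st.2 then (z, a + b) else st
  | _, _ => st

def pvRowZeros (i : Int) (row : List Int) : List (Int × Int) :=
  ((PySem.List.enumerate row).filter (fun q => decide (q.2 = 0))).map (fun q => (i, q.1))

theorem pvMem_enumerate {α : Type} (l : List α) (s : Int) (p : Int × α) :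
    p ∈ PySem.List.enumerate l s ↔ ∃ k : Nat, ∃ h : k < l.length, p = (s + k, l[k]) := by
  induction l generalizing s with
  | nil => simp [PySem.List.enumerate]
  | cons x t ih =>
    simp only [PySem.List.enumerate, List.mem_cons, ih]
    constructor
    · rintro (rfl | ⟨k, hk, rfl⟩)
      · exact ⟨0, by simp, by simp⟩
      · exact ⟨k + 1, by simpa using hk, by push_cast; simp [add_assoc, add_comm 1 (k : Int)]⟩
    · rintro ⟨k, hk, rfl⟩
      cases k with
      | zero => left; simp
      | succ k =>
        right
        exact ⟨k, by simpa using hk, by push_cast; simp [add_assoc, add_comm 1 (k : Int)]⟩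

theorem pvFindZeros_eq (m : List (List Int)) :
    pvFindZeros m = (PySem.List.enumerate m).flatMap (fun p => pvRowZeros p.1 p.2) := by
  unfold pvFindZeros
  have h1 : ∀ (acc : List (Int × Int)) (p : Int × List Int),
      (PySem.List.enumerate p.2).foldl (fun acc2 q =>
        if q.2 = 0 then acc2 ++ [(p.1, q.1)] else acc2) acc = acc ++ pvRowZeros p.1 p.2 := by
    intro acc p
    have := PySem.List.foldl_append_if (fun q : Int × Int => decide (q.2 = 0))
      (fun q => (p.1, q.1)) (PySem.List.enumerate p.2) acc
    simpa [pvRowZeros] using this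
  calc (PySem.List.enumerate m).foldl (fun acc p =>
          (PySem.List.enumerate p.2).foldl (fun acc2 q =>
            if q.2 = 0 then acc2 ++ [(p.1, q.1)] else acc2) acc) []
      = (PySem.List.enumerate m).foldl (fun acc p => acc ++ pvRowZeros p.1 p.2) [] := by
        apply PySem.List.foldl_congr_mem
        intro acc p _
        exact h1 acc p
    _ = _ := by
        have h2 := PySem.List.foldl_append_eq_flatMap
          (g := fun p : Int × List Int => pvRowZeros p.1 p.2)
          (l := PySem.List.enumerate m) (acc := [])
        simpa using h2

theorem pvMem_findZeros (m : List (List Int)) (z : Int × Int) (hz : z ∈ pvFindZeros m) :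
    ∃ i : Nat, ∃ hi : i < m.length, ∃ j : Nat, ∃ hj : j < m[i].length,
      z = ((i : Int), (j : Int)) ∧ m[i][j] = 0 := by
  rw [pvFindZeros_eq] at hz
  rcases List.mem_flatMap.1 hz with ⟨p, hp, hzp⟩
  rcases (pvMem_enumerate m 0 p).1 hp with ⟨i, hi, rfl⟩
  rcases List.mem_map.1 hzp with ⟨q, hq, rfl⟩
  rcases List.mem_filter.1 hq with ⟨hq', hq0⟩
  rcases (pvMem_enumerate _ 0 q).1 hq' with ⟨j, hj, rfl⟩
  exact ⟨i, hi, j, hj, by simp, by simpa using hq0⟩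

-- B's nested fold is a fold over A's zeros list
theorem pvAlt_eq_zfold (m : List (List Int)) :
    optymistyczne_wyznaczanie_odc_alt m = (pvFindZeros m).foldl (pvZStepB m) ((-1, -1), 0) := by
  rw [pvFindZeros_eq, List.foldl_flatMap]
  unfold optymistyczne_wyznaczanie_odc_alt
  apply PySem.List.foldl_congr_mem
  intro st p _
  show (PySem.List.enumerate p.2).foldl _ st = (pvRowZeros p.1 p.2).foldl (pvZStepB m) st
  unfold pvRowZeros
  rw [List.foldl_map, List.foldl_filter]
  apply PySem.List.foldl_congr_mem
  intro acc q _
  by_cases h : q.2 = 0 <;> simp [h, pvZStepB, pvNcols]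

-- the two per-element min steps agree
theorem pvMinNonzero_eq_foldA (xs : List Int) : pvMinNonzero xs = xs.foldl pvStepA none := by
  unfold pvMinNonzero
  apply PySem.List.foldl_congr_mem
  intro best v _
  cases best <;> simp [pvStepA, Bool.and_comm]

-- every row is at most pvNcols long
theorem pvFoldMax_le (t : List (List Int)) (acc : Nat) :
    acc ≤ t.foldl (fun a r => if a < r.length then r.length else a) acc := by
  induction t generalizing acc with
  | nil => simp
  | cons x s ih => exact le_trans (by dsimp only; split <;> omega) (ih _)

theorem pvLen_le_ncols (m : List (List Int)) (r : List Int) (hr : r ∈ m) :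
    r.length ≤ pvNcols m := by
  unfold pvNcols
  generalize 0 = acc
  induction m generalizing acc with
  | nil => cases hr
  | cons x s ih =>
    rcases List.mem_cons.1 hr with rfl | hr'
    · exact le_trans (by dsimp only; split <;> omega) (pvFoldMax_le s _)
    · exact ih hr' _

-- under Pre_, at a zero's column the comprehension sees every row's j-th entry,
-- i.e. B's column entries are exactly A's column()
theorem pvColEntries_eq_column (m : List (List Int)) (j : Nat)
    (h : ∀ r ∈ m, j < r.length) : pvColEntries m j = pvColumn m (j : Int) := by
  induction m with
  | nil => rfl
  | cons r t ih =>
    have hr : j < r.length := h r (by simp)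
    have ht : ∀ r' ∈ t, j < r'.length := fun r' hr' => h r' (by simp [hr'])
    simp [pvColEntries, pvColumn, PySem.List.pyGet?_natCast, List.getElem?_eq_getElem hr]
    simpa [pvColEntries, pvColumn] using ih ht

theorem pvZStep_agree (m : List (List Int)) (hpre : Pre_optymistyczne_wyznaczanie_odc m)
    (st : (Int × Int) × Int) (z : Int × Int) (hz : z ∈ pvFindZeros m) :
    pvZStepA m st z = pvZStepB m st z := by
  rcases pvMem_findZeros m z hz with ⟨i, hi, j, hj, rfl, hz0⟩
  have hrow : (PySem.List.pyGet? m (i : Int)).getD [] = m[i] := by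
    simp [PySem.List.pyGet?_natCast, List.getElem?_eq_getElem hi]
  have hcols : ∀ r ∈ m, j < r.length := by
    refine hpre m[i] (List.getElem_mem hi) j hj ?_
    simp [List.getElem?_eq_getElem hj, hz0]
  have hjn : j < pvNcols m :=
    lt_of_lt_of_le hj (pvLen_le_ncols m m[i] (List.getElem_mem hi))
  have him : i < (m.map pvMinNonzero).length := by simpa using hi
  have hrm : (PySem.List.pyGet? (m.map pvMinNonzero) (i : Int)).getD none
      = pvMinNonzero m[i] := by
    simp [PySem.List.pyGet?_natCast, List.getElem?_eq_getElem him]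
  have hcm : (PySem.List.pyGet? ((List.range (pvNcols m)).map
        (fun j => pvMinNonzero (pvColEntries m j))) (j : Int)).getD none
      = pvMinNonzero (pvColEntries m j) := by
    have hjlen : j < ((List.range (pvNcols m)).map
        (fun j => pvMinNonzero (pvColEntries m j))).length := by simpa using hjn
    simp [PySem.List.pyGet?_natCast, List.getElem?_eq_getElem hjlen]
  unfold pvZStepA pvZStepB
  rw [hrow, hrm, hcm, pvColEntries_eq_column m j hcols,
    pvMinNonzero_eq_foldA, pvMinNonzero_eq_foldA]

-- ===== VERDICT (by name: the statement is the Claim_ definition above) =====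
theorem optymistyczne_wyznaczanie_odc_spec : Claim_equal_optymistyczne_wyznaczanie_odc := by
  intro m _ hpre
  show optymistyczne_wyznaczanie_odc m = optymistyczne_wyznaczanie_odc_alt m
  rw [pvAlt_eq_zfold]
  unfold optymistyczne_wyznaczanie_odc
  exact PySem.List.foldl_congr_mem _ _ _ _ (fun st z hz => pvZStep_agree m hpre st z hz)
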